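-- pv_equiv track=rewrite | github.com/Isoris/inversion-popgen-toolkit | inversion_modules/phase_7_cargo/compute/STEP_C60_cargo_inventory.py | annotation_class
-- ===== SOURCE A (Python) =====
-- LOF_KEYWORDS = ('stop_gained', 'frameshift_variant', 'splice_acceptor_variant',
--                 'splice_donor_variant', 'start_lost', 'stop_lost')
--
-- def annotation_class(ann: str) -> str:
--     a = (ann or '').lower()
--     for kw in LOF_KEYWORDS:
--         if kw in a:
--             return 'LoF'
--     if 'missense' in a:
--         return 'missense'
--     return 'other'
-- ===== SOURCE B (Python) =====
-- LOF_KEYWORDS = ('stop_gained', 'frameshift_variant', 'splice_acceptor_variant',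
--                 'splice_donor_variant', 'start_lost', 'stop_lost')
--
-- def annotation_class(ann: str) -> str:
--     # Single left-to-right scan: at each position check all patterns at once,
--     # instead of six sequential whole-string substring searches.
--     a = (ann or '').lower()
--     miss = False
--     for i in range(len(a) + 1):
--         tail = a[i:]
--         if any(tail.startswith(kw) for kw in LOF_KEYWORDS):
--             return 'LoF'
--         if tail.startswith('missense'):
--             miss = True
--     return 'missense' if miss else 'other'
-- ===== Notes on version B (the rewrite author's own statement) =====
-- stated objective: alternative
-- what changed: Replaces six sequential whole-string substring searches (one per LoF keyword, then one for 'missense') by a single left-to-right scan of the string that tests every pattern simultaneously at each position, recording a missense flag along the way.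
import Mathlib
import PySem

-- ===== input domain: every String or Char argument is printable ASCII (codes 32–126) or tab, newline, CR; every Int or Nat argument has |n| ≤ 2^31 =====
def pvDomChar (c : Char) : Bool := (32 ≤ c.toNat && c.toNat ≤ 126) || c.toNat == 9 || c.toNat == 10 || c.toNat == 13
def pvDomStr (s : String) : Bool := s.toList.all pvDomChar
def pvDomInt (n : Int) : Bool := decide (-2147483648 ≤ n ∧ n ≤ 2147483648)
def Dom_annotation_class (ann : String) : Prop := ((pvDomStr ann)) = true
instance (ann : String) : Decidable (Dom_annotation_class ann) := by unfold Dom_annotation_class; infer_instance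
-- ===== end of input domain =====

-- B replaces six sequential substring searches by one simultaneous left-to-right scan (alternative; same cost).
-- ===== PORT A =====
-- shared module constant LOF_KEYWORDS (as lists of characters)
def pvLOF_KEYWORDS : List (List Char) :=
  ["stop_gained".toList, "frameshift_variant".toList, "splice_acceptor_variant".toList,
   "splice_donor_variant".toList, "start_lost".toList, "stop_lost".toList]

-- the 'for kw in LOF_KEYWORDS: if kw in a: return 'LoF'' loop, then the missense fallback
def pvLoopA : List (List Char) → List Char → String
  | [], a => if PySem.Chars.isIn "missense".toList a then "missense" else "other"
  | kw :: rest, a => if PySem.Chars.isIn kw a then "LoF" else pvLoopA rest a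

def annotation_class (ann : String) : String :=
  let a := PySem.Chars.lower (if ann = "" then "" else ann).toList   -- a = (ann or '').lower()
  pvLoopA pvLOF_KEYWORDS a

-- ===== PORT B =====
-- one pass over the tails a[i:] (i = 0 .. len a), all patterns tested at each position
def pvScanB : List Char → Bool → String
  | t, miss =>
    if pvLOF_KEYWORDS.any (fun kw => PySem.Chars.startswith t kw) then "LoF"
    else
      let miss' := miss || PySem.Chars.startswith t "missense".toList
      match t with
      | [] => if miss' then "missense" else "other"
      | _ :: rest => pvScanB rest miss'

def annotation_class_alt (ann : String) : String :=
  let a := PySem.Chars.lower (if ann = "" then "" else ann).toList   -- a = (ann or '').lower()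
  pvScanB a false
-- ===== PRECONDITION & SPEC =====
def Spec_annotation_class (ann : String) (out : String) : Prop := out = annotation_class_alt ann
instance (ann : String) (out : String) : Decidable (Spec_annotation_class ann out) := by unfold Spec_annotation_class; infer_instance

-- ===== CLAIM (what is proved, stated in full; the proofs are below) =====
def Claim_equal_annotation_class : Prop := ∀ (ann : String), Dom_annotation_class ann → Spec_annotation_class ann (annotation_class ann)

-- ===== LEMMAS AND PROOFS =====

-- ===== VERDICT (by name: the statement is the Claim_ definition above) =====
-- characterization of B's scan
theorem pvScanB_eq (t : List Char) (miss : Bool) :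
    pvScanB t miss =
      if pvLOF_KEYWORDS.any (fun kw => PySem.Chars.isIn kw t) then "LoF"
      else if miss || PySem.Chars.isIn "missense".toList t then "missense" else "other" := by
  induction t generalizing miss with
  | nil =>
    cases miss <;> decide
  | cons c cs ih =>
    have h : ∀ sub : List Char, PySem.Chars.isIn sub (c :: cs) =
        (PySem.Chars.startswith (c :: cs) sub || PySem.Chars.isIn sub cs) := by
      intro sub
      rcases hb : PySem.Chars.isIn sub (c :: cs) with _ | _
      · have hni := (PySem.Chars.isIn_eq_false_iff _ _).mp hb
        rw [List.infix_cons_iff] at hni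
        have ha : PySem.Chars.startswith (c :: cs) sub = false := by
          rw [Bool.eq_false_iff]
          intro hs
          exact hni (Or.inl ((PySem.Chars.startswith_iff _ _).mp hs))
        have hb2 : PySem.Chars.isIn sub cs = false := by
          rw [PySem.Chars.isIn_eq_false_iff]
          intro hs
          exact hni (Or.inr hs)
        simp [ha, hb2]
      · have := (PySem.Chars.isIn_iff_infix _ _).mp hb
        rw [List.infix_cons_iff] at this
        rcases this with h1 | h2
        · simp [(PySem.Chars.startswith_iff _ _).mpr h1]
        · simp [(PySem.Chars.isIn_iff_infix sub cs).mpr h2]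
    simp only [pvScanB, ih, h]
    by_cases hl : ∃ kw ∈ pvLOF_KEYWORDS, PySem.Chars.startswith (c :: cs) kw = true
    · -- a LoF keyword starts right here
      have : pvLOF_KEYWORDS.any (fun kw => PySem.Chars.startswith (c :: cs) kw) = true := List.any_eq_true.mpr hl
      have h2 : pvLOF_KEYWORDS.any (fun kw => PySem.Chars.startswith (c :: cs) kw || PySem.Chars.isIn kw cs) = true := by
        rcases hl with ⟨kw, hm, hs⟩
        exact List.any_eq_true.mpr ⟨kw, hm, by simp [hs]⟩
      simp [this, h2]
    · have h1 : pvLOF_KEYWORDS.any (fun kw => PySem.Chars.startswith (c :: cs) kw) = false := by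
        simp only [List.any_eq_false]
        intro kw hm
        simp only [Bool.not_eq_true]
        rcases hb : PySem.Chars.startswith (c :: cs) kw with _ | _
        · rfl
        · exact absurd ⟨kw, hm, hb⟩ hl
      have h2 : ∀ kw ∈ pvLOF_KEYWORDS,
          (PySem.Chars.startswith (c :: cs) kw || PySem.Chars.isIn kw cs) = PySem.Chars.isIn kw cs := by
        intro kw hm
        have := List.any_eq_false.mp h1 kw hm
        simp [Bool.eq_false_iff.mpr this]
      have h3 : pvLOF_KEYWORDS.any (fun kw => PySem.Chars.startswith (c :: cs) kw || PySem.Chars.isIn kw cs)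
          = pvLOF_KEYWORDS.any (fun kw => PySem.Chars.isIn kw cs) := by
        rcases hx : pvLOF_KEYWORDS.any (fun kw => PySem.Chars.isIn kw cs) with _ | _
        · rw [List.any_eq_false] at hx ⊢
          intro kw hm
          rw [h2 kw hm]
          exact hx kw hm
        · rw [List.any_eq_true] at hx ⊢
          rcases hx with ⟨kw, hm, hv⟩
          exact ⟨kw, hm, by rw [h2 kw hm]; exact hv⟩
      simp only [h1, h3]
      by_cases hr : pvLOF_KEYWORDS.any (fun kw => PySem.Chars.isIn kw cs) = true
      · simp [hr]
      · simp only [Bool.not_eq_true] at hr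
        simp only [hr]
        congr 1
        cases miss <;> cases hb : PySem.Chars.startswith (c :: cs) "missense".toList <;>
          cases hc : PySem.Chars.isIn "missense".toList cs <;> simp_all

-- characterization of A's loop
theorem pvLoopA_eq (kws : List (List Char)) (a : List Char) :
    pvLoopA kws a =
      if kws.any (fun kw => PySem.Chars.isIn kw a) then "LoF"
      else if PySem.Chars.isIn "missense".toList a then "missense" else "other" := by
  induction kws with
  | nil => simp [pvLoopA]
  | cons kw rest ih =>
    simp only [pvLoopA, ih, List.any_cons]
    by_cases h : PySem.Chars.isIn kw a = true
    · simp [h]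
    · simp only [Bool.not_eq_true] at h
      simp [h]

theorem annotation_class_spec : Claim_equal_annotation_class := by
  intro ann _
  unfold Spec_annotation_class annotation_class annotation_class_alt
  rw [pvLoopA_eq, pvScanB_eq]
  rfl
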